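-- pv_equiv track=rewrite | github.com/andiwinata/SupplyTracker | app/views.py | remove_table_redundancy
-- ===== SOURCE A (Python) =====
-- def remove_table_redundancy(table, exception_index):
--     """
--     convert duplicated next row into ''
--     enter exception_index to prevent removal of duplicate in certain column
--     """
--     total_clmn = len(table[0])
--     data = [''] * total_clmn
--     # row
--     for i in range(len(table)):
--         table[i] = list(table[i])
--         # cell
--         for j in range(len(table[i])):
--             if j in exception_index:
--                 continue
--
--             if table[i][j] == data[j]:
--                 table[i][j] = ''
--             else:
--                 data[j] = table[i][j]
--
--     return table
-- ===== SOURCE B (Python) =====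
-- def remove_table_redundancy(table, exception_index):
--     # column-major rewrite: one prev value per column walk, mutates table in place like A
--     for i in range(len(table)):
--         table[i] = list(table[i])
--     width = len(table[0])
--     for j in range(width):
--         if j in exception_index:
--             continue
--         prev = ''
--         for row in table:
--             if j < len(row):
--                 if row[j] == prev:
--                     row[j] = ''
--                 else:
--                     prev = row[j]
--     return table
-- ===== Notes on version B (the rewrite author's own statement) =====
-- stated objective: faster
-- what changed: B inverts the loop nest to column-major: per column it tests exception membership once and walks the rows carrying a single prev value, instead of A's row-major pass that keeps a data vector and re-runs the linear 'j in exception_index' scan for every cell.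
import Mathlib
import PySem

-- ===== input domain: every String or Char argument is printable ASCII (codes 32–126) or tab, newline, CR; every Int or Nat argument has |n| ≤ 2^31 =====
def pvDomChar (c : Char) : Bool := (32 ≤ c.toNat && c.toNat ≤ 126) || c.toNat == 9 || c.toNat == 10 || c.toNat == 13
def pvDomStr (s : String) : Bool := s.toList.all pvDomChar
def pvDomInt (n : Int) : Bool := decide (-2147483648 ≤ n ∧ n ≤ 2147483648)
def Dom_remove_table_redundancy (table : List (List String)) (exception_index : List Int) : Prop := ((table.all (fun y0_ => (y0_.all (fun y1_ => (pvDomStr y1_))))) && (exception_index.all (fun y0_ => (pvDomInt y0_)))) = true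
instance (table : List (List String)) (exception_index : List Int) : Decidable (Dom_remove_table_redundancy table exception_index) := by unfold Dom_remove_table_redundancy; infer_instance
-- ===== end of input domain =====

-- B re-traverses column-by-column (one prev per column) instead of A's row-by-row pass with a data vector;
-- both Pythons mutate `table` in place and return it — the equivalence proved here is about the return value.

-- ===== PORT A =====
-- inner cell step: `if j in exception_index: continue; if table[i][j]==data[j]: table[i][j]='' else data[j]=table[i][j]`
-- (getD defaults stand for the indexings, which are in range on Pre_)
def rtrCellA (exception_index : List Int) (acc : List String × List String) (j : Nat) : List String × List String :=
  if exception_index.contains (j : Int) then acc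
  else if acc.1.getD j "" == acc.2.getD j "" then (acc.1.set j "", acc.2)
  else (acc.1, acc.2.set j (acc.1.getD j ""))

def remove_table_redundancy (table : List (List String)) (exception_index : List Int) : List (List String) :=
  let total_clmn := (table.headD []).length
  (table.foldl (fun acc row =>
      let rd := (List.range row.length).foldl (rtrCellA exception_index) (row, acc.2)
      (acc.1 ++ [rd.1], rd.2))
    (([] : List (List String)), List.replicate total_clmn "")).1

-- ===== PORT B =====
-- walk one column j down the rows, carrying a single prev (starts ''); rows shorter than j+1 are skipped
def rtrColB (j : Nat) (table : List (List String)) : List (List String) :=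
  (table.foldl (fun acc row =>
      if j < row.length then
        if row.getD j "" == acc.2 then (acc.1 ++ [row.set j ""], acc.2)
        else (acc.1 ++ [row], row.getD j "")
      else (acc.1 ++ [row], acc.2))
    (([] : List (List String)), "")).1

def remove_table_redundancy_alt (table : List (List String)) (exception_index : List Int) : List (List String) :=
  (List.range (table.headD []).length).foldl
    (fun t (j : Nat) => if exception_index.contains (j : Int) then t else rtrColB j t) table

-- ===== PRECONDITION & SPEC =====
-- Pre_ excludes exactly the inputs where Python A raises IndexError: the empty table (table[0]),
-- and ragged rows reaching a column j ≥ len(table[0]) not listed in exception_index (data[j]).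
def Pre_remove_table_redundancy (table : List (List String)) (exception_index : List Int) : Prop :=
  table ≠ [] ∧ ∀ row ∈ table, ∀ j ∈ List.range row.length,
    (table.headD []).length ≤ j → (j : Int) ∈ exception_index
instance (table : List (List String)) (exception_index : List Int) : Decidable (Pre_remove_table_redundancy table exception_index) := by unfold Pre_remove_table_redundancy; infer_instance

def pvWitness_remove_table_redundancy : List (List String) × List Int := ([["a", "a"], ["a", "b"]], [1])

def Spec_remove_table_redundancy (table : List (List String)) (exception_index : List Int) (out : List (List String)) : Prop := out = remove_table_redundancy_alt table exception_index
instance (table : List (List String)) (exception_index : List Int) (out : List (List String)) : Decidable (Spec_remove_table_redundancy table exception_index out) := by unfold Spec_remove_table_redundancy; infer_instance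

-- ===== CLAIM (what is proved, stated in full; the proofs are below) =====
def Claim_equal_remove_table_redundancy : Prop := ∀ (table : List (List String)) (exception_index : List Int), Dom_remove_table_redundancy table exception_index → Pre_remove_table_redundancy table exception_index → Spec_remove_table_redundancy table exception_index (remove_table_redundancy table exception_index)

-- ===== LEMMAS AND PROOFS =====

-- normalized cell step (no exception check, explicit in-range guard)
def nstep (acc : List String × List String) (j : Nat) : List String × List String :=
  if j < acc.1.length then
    if acc.1.getD j "" == acc.2.getD j "" then (acc.1.set j "", acc.2)
    else (acc.1, acc.2.set j (acc.1.getD j ""))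
  else acc

-- common normal form: row recursion, data vector threaded through
def goN (js : List Nat) (data : List String) : List (List String) → List (List String)
  | [] => []
  | r :: rs => (js.foldl nstep (r, data)).1 :: goN js (js.foldl nstep (r, data)).2 rs

-- column walk as structural recursion
def colBrec (j : Nat) (prev : String) : List (List String) → List (List String)
  | [] => []
  | r :: rs =>
    if j < r.length then
      if r.getD j "" == prev then (r.set j "") :: colBrec j prev rs
      else r :: colBrec j (r.getD j "") rs
    else r :: colBrec j prev rs

-- column-major normal form
def CB (data : List String) (js : List Nat) (tbl : List (List String)) : List (List String) :=
  js.foldl (fun t j => colBrec j (data.getD j "") t) tbl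

lemma nstep_len1 (acc : List String × List String) (j : Nat) : (nstep acc j).1.length = acc.1.length := by
  unfold nstep; split_ifs <;> simp

lemma nstep_len2 (acc : List String × List String) (j : Nat) : (nstep acc j).2.length = acc.2.length := by
  unfold nstep; split_ifs <;> simp

lemma foldl_nstep_len1 (l : List Nat) (acc : List String × List String) :
    (l.foldl nstep acc).1.length = acc.1.length := by
  induction l generalizing acc with
  | nil => rfl
  | cons j t ih => simp [List.foldl_cons, ih, nstep_len1]

lemma foldl_nstep_len2 (l : List Nat) (acc : List String × List String) :
    (l.foldl nstep acc).2.length = acc.2.length := by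
  induction l generalizing acc with
  | nil => rfl
  | cons j t ih => simp [List.foldl_cons, ih, nstep_len2]

lemma cellA_eq (exception_index : List Int) (acc : List String × List String) (j : Nat)
    (hj : j < acc.1.length) :
    rtrCellA exception_index acc j =
      if exception_index.contains (j : Int) then acc else nstep acc j := by
  unfold rtrCellA nstep
  split_ifs <;> simp_all

-- A's inner fold = fold of nstep over the exception-filtered index list
lemma foldA_filter (exception_index : List Int) (l : List Nat) (acc : List String × List String)
    (h : ∀ j ∈ l, j < acc.1.length) :
    l.foldl (rtrCellA exception_index) acc =
      (l.filter (fun (j : Nat) => ! exception_index.contains (j : Int))).foldl nstep acc := by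
  induction l generalizing acc with
  | nil => rfl
  | cons j t ih =>
    have hj : j < acc.1.length := h j (by simp)
    rw [List.foldl_cons, cellA_eq exception_index acc j hj, List.filter_cons]
    by_cases hc : exception_index.contains (j : Int)
    · rw [if_pos hc, if_neg (by simpa using hc)]
      exact ih acc fun j' hj' => h j' (List.mem_cons_of_mem _ hj')
    · rw [if_neg hc, if_pos (by simpa using hc), List.foldl_cons]
      refine ih _ fun j' hj' => ?_
      rw [nstep_len1]; exact h j' (List.mem_cons_of_mem _ hj')

-- fold of nstep over indices ≥ row length is the identity
lemma foldl_nstep_big (l : List Nat) (acc : List String × List String)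
    (h : ∀ j ∈ l, acc.1.length ≤ j) :
    l.foldl nstep acc = acc := by
  induction l with
  | nil => rfl
  | cons j t ih =>
    have hb : nstep acc j = acc := by
      unfold nstep
      rw [if_neg (by have := h j (by simp); omega)]
    rw [List.foldl_cons, hb]
    exact ih fun j' hj' => h j' (List.mem_cons_of_mem _ hj')

lemma nstep_getD2_ne (acc : List String × List String) (j j' : Nat) (h : j ≠ j') :
    (nstep acc j).2.getD j' "" = acc.2.getD j' "" := by
  unfold nstep; split_ifs <;> simp [List.getD_eq_getElem?_getD, List.getElem?_set_ne h]

-- index-list normalization for one row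
lemma row_norm (exception_index : List Int) (W : Nat) (r : List String) (data : List String)
    (hrow : ∀ j, W ≤ j → j < r.length → (j : Int) ∈ exception_index) :
    (List.range r.length).foldl (rtrCellA exception_index) (r, data) =
      ((List.range W).filter (fun (j : Nat) => ! exception_index.contains (j : Int))).foldl nstep (r, data) := by
  rw [foldA_filter exception_index _ _ (fun j hj => by simpa [List.mem_range] using hj)]
  rcases le_total r.length W with hle | hle
  · obtain ⟨k, hk⟩ : ∃ k, W = r.length + k := ⟨W - r.length, by omega⟩
    rw [hk, List.range_add, List.filter_append, List.foldl_append]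
    refine (foldl_nstep_big _ _ ?_).symm
    intro j hj
    simp only [List.mem_filter, List.mem_map, List.mem_range] at hj
    obtain ⟨⟨x, hx, rfl⟩, -⟩ := hj
    rw [foldl_nstep_len1]
    simp
  · obtain ⟨k, hk⟩ : ∃ k, r.length = W + k := ⟨r.length - W, by omega⟩
    rw [hk, List.range_add, List.filter_append]
    have hz : (((List.range k).map (W + ·)).filter (fun (j : Nat) => ! exception_index.contains (j : Int))) = [] := by
      rw [List.filter_eq_nil_iff]
      intro j hj
      simp only [List.mem_map, List.mem_range] at hj
      obtain ⟨x, hx, rfl⟩ := hj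
      have := hrow (W + x) (by omega) (by omega)
      simpa using this
    rw [hz, List.append_nil]

-- CB only depends on data at indices in js
lemma CB_congr (js : List Nat) (d₁ d₂ : List String) (tbl : List (List String))
    (h : ∀ j ∈ js, d₁.getD j "" = d₂.getD j "") :
    CB d₁ js tbl = CB d₂ js tbl := by
  induction js generalizing tbl with
  | nil => rfl
  | cons j t ih =>
    unfold CB
    rw [List.foldl_cons, List.foldl_cons, h j (by simp)]
    exact ih _ (fun j' hj' => h j' (List.mem_cons_of_mem _ hj'))

-- foldl nstep does not touch data outside the index list
lemma foldl_nstep_untouched (l : List Nat) (acc : List String × List String) (j : Nat)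
    (hj : j ∉ l) : ((l.foldl nstep acc).2).getD j "" = acc.2.getD j "" := by
  induction l generalizing acc with
  | nil => rfl
  | cons j' t ih =>
    rw [List.foldl_cons, ih _ (fun h => hj (List.mem_cons_of_mem _ h))]
    exact nstep_getD2_ne acc j' j (fun h => hj (h ▸ List.mem_cons_self))

-- key exchange: one column-major sweep over (r :: rs) = process r row-wise, then recurse
lemma CB_cons (js : List Nat) (data : List String) (r : List String) (rs : List (List String))
    (hnd : js.Nodup) (hlt : ∀ j ∈ js, j < data.length) :
    CB data js (r :: rs) =
      (js.foldl nstep (r, data)).1 :: CB ((js.foldl nstep (r, data)).2) js rs := by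
  induction js generalizing data r rs with
  | nil => rfl
  | cons j t ih =>
    have hjt : j ∉ t := (List.nodup_cons.mp hnd).1
    have hndt : t.Nodup := (List.nodup_cons.mp hnd).2
    have hjd : j < data.length := hlt j (by simp)
    have hcol : colBrec j (data.getD j "") (r :: rs)
        = (nstep (r, data) j).1 :: colBrec j ((nstep (r, data) j).2.getD j "") rs := by
      rw [colBrec]
      by_cases h1 : j < r.length
      · by_cases h2 : r[j]'h1 = data[j]'hjd
        · simp [nstep, h1, h2, List.getD_eq_getElem?_getD, List.getElem?_eq_getElem hjd]
        · simp [nstep, h1, h2, List.getD_eq_getElem?_getD,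
            List.getElem?_set_self, hjd]
      · simp [nstep, h1]
    show CB data t (colBrec j (data.getD j "") (r :: rs)) = _
    rw [hcol]
    rw [CB_congr t data ((nstep (r, data) j).2) _
      (fun j' hj' => (nstep_getD2_ne (r, data) j j' (fun h => hjt (h ▸ hj'))).symm)]
    rw [ih ((nstep (r, data) j).2) (nstep (r, data) j).1 _ hndt
      (fun j' hj' => by rw [nstep_len2]; exact hlt j' (List.mem_cons_of_mem _ hj'))]
    rw [List.foldl_cons]
    congr 1
    show _ = CB ((t.foldl nstep (nstep (r, data) j)).2) t
      (colBrec j (((t.foldl nstep (nstep (r, data) j)).2).getD j "") rs)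
    rw [foldl_nstep_untouched t (nstep (r, data) j) j hjt]

lemma CB_nil (data : List String) (js : List Nat) : CB data js [] = [] := by
  induction js with
  | nil => rfl
  | cons j t ih => simpa [CB, colBrec] using ih

lemma CB_eq_goN (js : List Nat) (data : List String) (tbl : List (List String))
    (hnd : js.Nodup) (hlt : ∀ j ∈ js, j < data.length) :
    CB data js tbl = goN js data tbl := by
  induction tbl generalizing data with
  | nil => rw [CB_nil]; rfl
  | cons r rs ih =>
    rw [CB_cons js data r rs hnd hlt, goN]
    congr 1
    refine ih _ fun j hj => ?_
    rw [foldl_nstep_len2]; exact hlt j hj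

-- A = goN
lemma A_eq_goN (table : List (List String)) (exception_index : List Int)
    (hrag : ∀ row ∈ table, ∀ j, (table.headD []).length ≤ j → j < row.length → (j : Int) ∈ exception_index) :
    remove_table_redundancy table exception_index =
      goN ((List.range (table.headD []).length).filter (fun (j : Nat) => ! exception_index.contains (j : Int)))
        (List.replicate (table.headD []).length "") table := by
  have main : ∀ (tbl : List (List String)) (acc : List (List String) × List String),
      (∀ row ∈ tbl, ∀ j, (table.headD []).length ≤ j → j < row.length → (j : Int) ∈ exception_index) →
      (tbl.foldl (fun acc row =>
          let rd := (List.range row.length).foldl (rtrCellA exception_index) (row, acc.2)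
          (acc.1 ++ [rd.1], rd.2)) acc).1
        = acc.1 ++ goN ((List.range (table.headD []).length).filter
            (fun (j : Nat) => ! exception_index.contains (j : Int))) acc.2 tbl := by
    intro tbl
    induction tbl with
    | nil => intro acc _; simp [goN]
    | cons r rs ih =>
      intro acc h
      rw [List.foldl_cons]
      rw [ih _ (fun row hr => h row (List.mem_cons_of_mem _ hr))]
      show acc.1 ++ [((List.range r.length).foldl (rtrCellA exception_index) (r, acc.2)).1] ++ _ = _
      rw [row_norm exception_index _ r acc.2 (fun j h1 h2 => h r (by simp) j h1 h2)]
      rw [goN, List.append_assoc]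
      rfl
  have := main table (([] : List (List String)), List.replicate (table.headD []).length "") hrag
  simpa [remove_table_redundancy] using this

-- the appended column walk equals the recursive one
lemma colB_fold (j : Nat) (tbl : List (List String)) (acc : List (List String) × String) :
    (tbl.foldl (fun acc row =>
        if j < row.length then
          if row.getD j "" == acc.2 then (acc.1 ++ [row.set j ""], acc.2)
          else (acc.1 ++ [row], row.getD j "")
        else (acc.1 ++ [row], acc.2)) acc).1 = acc.1 ++ colBrec j acc.2 tbl := by
  induction tbl generalizing acc with
  | nil => simp [colBrec]
  | cons r rs ih =>
    rw [List.foldl_cons, ih, colBrec]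
    by_cases h1 : j < r.length
    · rw [if_pos h1, if_pos h1]
      by_cases h2 : r.getD j "" == acc.2
      · rw [if_pos h2, if_pos h2]; simp
      · rw [if_neg h2, if_neg h2]; simp
    · rw [if_neg h1, if_neg h1]; simp

lemma rtrColB_eq (j : Nat) (tbl : List (List String)) : rtrColB j tbl = colBrec j "" tbl := by
  unfold rtrColB
  rw [colB_fold]
  rfl

lemma getD_replicate (n j : Nat) : (List.replicate n ("" : String)).getD j "" = "" := by
  rcases lt_or_ge j n with h | h
  · simp [List.getD_eq_getElem?_getD, List.getElem?_replicate, h]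
  · have hn : (List.replicate n ("" : String))[j]? = none :=
      List.getElem?_eq_none (by simpa using h)
    simp [List.getD_eq_getElem?_getD, hn]

-- B = CB
lemma B_eq_CB (table : List (List String)) (exception_index : List Int) :
    remove_table_redundancy_alt table exception_index =
      CB (List.replicate (table.headD []).length "")
        ((List.range (table.headD []).length).filter (fun (j : Nat) => ! exception_index.contains (j : Int))) table := by
  unfold remove_table_redundancy_alt CB
  have hg : ∀ (l : List Nat) (t : List (List String)),
      l.foldl (fun t (j : Nat) => if exception_index.contains (j : Int) then t else rtrColB j t) t
        = (l.filter (fun (j : Nat) => ! exception_index.contains (j : Int))).foldl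
            (fun t j => rtrColB j t) t := by
    intro l
    induction l with
    | nil => intro t; rfl
    | cons j t ih =>
      intro tb
      rw [List.foldl_cons, List.filter_cons]
      by_cases hc : exception_index.contains (j : Int)
      · rw [if_pos hc, if_neg (by simpa using hc), ih]
      · rw [if_neg hc, if_pos (by simpa using hc), List.foldl_cons, ih]
  rw [hg]
  congr 1
  funext t j
  rw [rtrColB_eq, getD_replicate]

-- ===== VERDICT (by name: the statement is the Claim_ definition above) =====
theorem remove_table_redundancy_spec : Claim_equal_remove_table_redundancy := by
  intro table exception_index _ hpre
  unfold Spec_remove_table_redundancy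
  obtain ⟨-, hrag⟩ := hpre
  rw [A_eq_goN table exception_index
    (fun row hr j h1 h2 => hrag row hr j (List.mem_range.mpr h2) h1)]
  rw [B_eq_CB table exception_index]
  rw [CB_eq_goN _ _ _ (List.Nodup.filter _ List.nodup_range)
    (fun j hj => by
      have := (List.mem_filter.mp hj).1
      simpa [List.length_replicate] using List.mem_range.mp this)]
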